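-- pv_equiv track=rewrite | github.com/ChoiRang/study | pythonProject/baekjoon/section_4/q1317.py | check
-- ===== SOURCE A (Python) =====
-- def check(word: str):
-- 	n = len(word)
-- 	i = 0
-- 	seen = set()
-- 	while i < n:
-- 		ch = word[i]
-- 		if ch in seen:
-- 			return False
-- 		seen.add(ch)
-- 		while i < n and word[i] == ch:
-- 			i += 1
--
-- 	return True
-- ===== SOURCE B (Python) =====
-- def check(word: str):
--     # Phase 1: collapse runs to their leading character.
--     groups = []
--     prev = None
--     for ch in word:
--         if ch != prev:
--             groups.append(ch)
--             prev = ch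
--     # Phase 2: each character forms one block iff no leader repeats.
--     return len(groups) == len(set(groups))
-- ===== Notes on version B (the rewrite author's own statement) =====
-- stated objective: alternative
-- what changed: A interleaves run-skipping (an indexed inner while with a seen-set and early return); B first collapses the word into the list of run leaders with one direct for-loop over the characters, then answers by comparing the leader count with the count of distinct leaders.
import Mathlib
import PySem

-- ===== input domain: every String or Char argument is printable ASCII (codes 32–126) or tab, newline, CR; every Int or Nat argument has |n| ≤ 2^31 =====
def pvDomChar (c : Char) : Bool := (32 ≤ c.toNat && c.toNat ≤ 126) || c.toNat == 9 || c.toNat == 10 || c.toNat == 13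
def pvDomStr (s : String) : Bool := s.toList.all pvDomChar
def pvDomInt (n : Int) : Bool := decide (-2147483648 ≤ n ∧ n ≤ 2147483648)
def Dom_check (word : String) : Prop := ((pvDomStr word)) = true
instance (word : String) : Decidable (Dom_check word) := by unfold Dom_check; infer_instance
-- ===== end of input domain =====

-- B collapses the word to its run leaders first and then counts distinct leaders; A's interleaved seen-set scan is replaced by a two-phase structure (same cost).

-- ===== PORT A =====
-- outer while loop of A: read word[i], test against seen, then the inner while skips the run
def checkLoop : List Char → PySem.Set Char → Bool
  | [], _ => true
  | c :: rest, seen =>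
    if PySem.Set.contains seen c then false
    else checkLoop (rest.dropWhile (· == c)) (PySem.Set.add seen c)
termination_by cs _ => cs.length
decreasing_by
  simpa using Nat.lt_succ_of_le (rest.length_dropWhile_le (· == c))

def check (word : String) : Bool := checkLoop word.toList PySem.Set.empty

-- ===== PORT B =====
-- phase 1 of B: the for-loop collapsing runs, state = (groups, prev)
def collapseStep (st : List Char × Option Char) (ch : Char) : List Char × Option Char :=
  if some ch ≠ st.2 then (st.1 ++ [ch], some ch) else st

def check_alt (word : String) : Bool :=
  let groups := (word.toList.foldl collapseStep ([], none)).1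
  (groups.length : Int) == PySem.Set.len (PySem.Set.ofList groups)

-- ===== PRECONDITION & SPEC =====
def Spec_check (word : String) (out : Bool) : Prop := out = check_alt word
instance (word : String) (out : Bool) : Decidable (Spec_check word out) := by unfold Spec_check; infer_instance

-- ===== CLAIM (what is proved, stated in full; the proofs are below) =====
def Claim_equal_check : Prop := ∀ (word : String), Dom_check word → Spec_check word (check word)

-- ===== LEMMAS AND PROOFS =====

-- run leaders of a list, given the previous character
def lead : Option Char → List Char → List Char
  | _, [] => []
  | p, c :: rest => if some c ≠ p then c :: lead (some c) rest else lead p rest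

theorem foldl_collapseStep (cs : List Char) : ∀ (g : List Char) (p : Option Char),
    (cs.foldl collapseStep (g, p)).1 = g ++ lead p cs := by
  induction cs with
  | nil => simp [lead]
  | cons c rest ih =>
    intro g p
    by_cases h : some c = p
    · simp [List.foldl_cons, collapseStep, h, lead, ih]
    · simp [List.foldl_cons, collapseStep, h, lead, ih]

theorem lead_some_eq_dropWhile (cs : List Char) : ∀ (c : Char),
    lead (some c) cs = lead none (cs.dropWhile (· == c)) := by
  induction cs with
  | nil => intro c; simp [lead]
  | cons d rest ih =>
    intro c
    by_cases h : d = c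
    · subst h; simpa [lead, List.dropWhile] using ih d
    · have hb : (d == c) = false := by simp [h]
      simp [lead, List.dropWhile, hb, h]

theorem mem_add_iff (s : PySem.Set Char) (c x : Char) :
    x ∈ PySem.Set.add s c ↔ (x = c ∨ x ∈ s) := by
  rw [PySem.Set.mem_add]; tauto

theorem contains_iff_mem (s : PySem.Set Char) (x : Char) :
    PySem.Set.contains s x = true ↔ x ∈ s := by
  simp [PySem.Set.contains, List.contains_eq_mem]

theorem lead_none_cons (c : Char) (rest : List Char) :
    lead none (c :: rest) = c :: lead none (rest.dropWhile (· == c)) := by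
  simp [lead, lead_some_eq_dropWhile]

theorem checkLoop_iff (cs : List Char) (seen : PySem.Set Char) :
    checkLoop cs seen = true ↔
      ((lead none cs).Nodup ∧ ∀ x ∈ lead none cs, x ∉ seen) := by
  induction cs, seen using checkLoop.induct with
  | case1 seen => simp [checkLoop, lead]
  | case2 c rest seen h =>
    rw [checkLoop, if_pos h]
    simp only [Bool.false_eq_true, false_iff, not_and]
    intro _ hall
    have hc : c ∈ seen := (contains_iff_mem seen c).mp h
    have hmem : c ∈ lead none (c :: rest) := by
      rw [lead_none_cons]; exact List.mem_cons_self
    exact hall c hmem hc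
  | case3 c rest seen h ih =>
    rw [checkLoop, if_neg h, ih, lead_none_cons]
    have hc : c ∉ seen := fun hm => h ((contains_iff_mem seen c).mpr hm)
    constructor
    · rintro ⟨nd, hall⟩
      have hcl : c ∉ lead none (rest.dropWhile (· == c)) := fun hm =>
        hall c hm ((mem_add_iff seen c c).mpr (Or.inl rfl))
      refine ⟨List.nodup_cons.mpr ⟨hcl, nd⟩, ?_⟩
      intro x hx
      rcases List.mem_cons.mp hx with rfl | hx
      · exact hc
      · exact fun hm => hall x hx ((mem_add_iff seen c x).mpr (Or.inr hm))
    · rintro ⟨nd, hall⟩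
      rcases List.nodup_cons.mp nd with ⟨hcl, nd'⟩
      refine ⟨nd', ?_⟩
      intro x hx hm
      rcases (mem_add_iff seen c x).mp hm with rfl | hm'
      · exact hcl hx
      · exact hall x (List.mem_cons_of_mem c hx) hm'

theorem ofList_exists_sublist (l : List Char) : ∀ (s : List Char),
    ∃ t, l.foldl PySem.Set.add s = s ++ t ∧ List.Sublist t l := by
  induction l with
  | nil => intro s; exact ⟨[], by simp⟩
  | cons c rest ih =>
    intro s
    by_cases h : c ∈ s
    · obtain ⟨t, ht, hsub⟩ := ih s
      refine ⟨t, ?_, hsub.cons c⟩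
      simpa [PySem.Set.add, h] using ht
    · obtain ⟨t, ht, hsub⟩ := ih (s ++ [c])
      refine ⟨c :: t, ?_, hsub.cons₂ c⟩
      rw [List.foldl_cons]
      have hadd : PySem.Set.add s c = s ++ [c] := by simp [PySem.Set.add, h]
      rw [hadd, ht, List.append_assoc]
      rfl

theorem len_ofList_iff (l : List Char) :
    ((l.length : Int) == PySem.Set.len (PySem.Set.ofList l)) = true ↔ l.Nodup := by
  have hsub : List.Sublist (PySem.Set.ofList l) l := by
    obtain ⟨t, ht, hs⟩ := ofList_exists_sublist l []
    rw [PySem.Set.ofList_eq_foldl, ht]; simpa using hs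
  simp only [PySem.Set.len, beq_iff_eq, Nat.cast_inj]
  constructor
  · intro hlen
    have heq := List.Sublist.eq_of_length hsub hlen.symm
    exact heq ▸ PySem.Set.nodup_ofList l
  · intro hnd
    have hperm : (PySem.Set.ofList l).Perm l :=
      (List.perm_ext_iff_of_nodup (PySem.Set.nodup_ofList l) hnd).mpr
        (fun a => PySem.Set.mem_ofList l a)
    exact hperm.length_eq.symm

-- ===== VERDICT (by name: the statement is the Claim_ definition above) =====
theorem check_spec : Claim_equal_check := by
  intro word _
  unfold Spec_check check check_alt
  rw [Bool.eq_iff_iff, checkLoop_iff]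
  simp only [foldl_collapseStep, List.nil_append]
  rw [len_ofList_iff]
  simp [PySem.Set.empty]
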